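-- pv_equiv track=rewrite | github.com/KunjAgwl/WarehouseRobo | main.py | generate_route
-- ===== SOURCE A (Python) =====
-- DEPOT = (0, 0)  # Starting point
--
-- TASKS = [  # Sample tasks: ((pick_x, pick_y), (drop_x, drop_y))
--     ((5, 1), (8, 9)),
--     ((7, 4), (1, 11)),
--     ((3, 6), (12, 2)),
--     ((9, 5), (4, 13)),
--     ((11, 8), (6, 0)),
--     ((8, 2), (0, 14)),
--     ((2, 9), (10, 12)),
--     ((4, 10), (13, 7)),
-- ]
--
-- def manhattan_path(start, end):
--     path = []
--     current = list(start)
--     while current != list(end):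
--         if current[0] < end[0]:
--             current[0] += 1
--         elif current[0] > end[0]:
--             current[0] -= 1
--         elif current[1] < end[1]:
--             current[1] += 1
--         elif current[1] > end[1]:
--             current[1] -= 1
--         path.append(tuple(current))
--     return path
--
-- def generate_route(chromosome):
--     route = [DEPOT]
--     pos = DEPOT
--     for gene in chromosome:
--         pick, drop = TASKS[gene]
--         route.extend(manhattan_path(pos, pick)[1:])
--         pos = pick
--         route.extend(manhattan_path(pos, drop)[1:])
--         pos = drop
--     return route
-- ===== SOURCE B (Python) =====
-- DEPOT = (0, 0)
--
-- TASKS = [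
--     ((5, 1), (8, 9)),
--     ((7, 4), (1, 11)),
--     ((3, 6), (12, 2)),
--     ((9, 5), (4, 13)),
--     ((11, 8), (6, 0)),
--     ((8, 2), (0, 14)),
--     ((2, 9), (10, 12)),
--     ((4, 10), (13, 7)),
-- ]
--
-- def _segment(start, end):
--     # closed-form L-path: full x-sweep, then y-sweep (both exclusive of start)
--     (sx, sy), (ex, ey) = start, end
--     xs = range(sx + 1, ex + 1) if sx <= ex else range(sx - 1, ex - 1, -1)
--     ys = range(sy + 1, ey + 1) if sy <= ey else range(sy - 1, ey - 1, -1)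
--     return [(x, sy) for x in xs] + [(ex, y) for y in ys]
--
-- def generate_route(chromosome):
--     route = [DEPOT]
--     pos = DEPOT
--     for gene in chromosome:
--         pick, drop = TASKS[gene]
--         route += _segment(pos, pick)[1:]
--         route += _segment(pick, drop)[1:]
--         pos = drop
--     return route
-- ===== Notes on version B (the rewrite author's own statement) =====
-- stated objective: simpler
-- what changed: Each Manhattan segment is produced in closed form as two arithmetic range sweeps (x-sweep then y-sweep) concatenated, instead of simulating unit steps in a while-loop that compares and mutates the current position one coordinate at a time.
import Mathlib
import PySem

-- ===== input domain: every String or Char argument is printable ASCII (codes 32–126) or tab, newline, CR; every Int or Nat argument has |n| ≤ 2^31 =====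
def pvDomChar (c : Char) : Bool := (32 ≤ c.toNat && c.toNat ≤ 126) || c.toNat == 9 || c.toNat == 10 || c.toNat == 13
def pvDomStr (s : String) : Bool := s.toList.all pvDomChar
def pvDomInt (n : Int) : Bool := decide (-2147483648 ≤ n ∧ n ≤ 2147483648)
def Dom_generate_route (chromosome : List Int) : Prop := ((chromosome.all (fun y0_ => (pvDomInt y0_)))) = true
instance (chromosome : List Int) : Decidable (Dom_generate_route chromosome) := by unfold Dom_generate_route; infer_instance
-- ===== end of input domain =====

-- B builds each Manhattan segment in closed form (two range sweeps) instead of A's unit-step while-loop; objective: simpler.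

-- ===== PORT A =====
def pvTASKS : List ((Int × Int) × (Int × Int)) :=
  [((5, 1), (8, 9)), ((7, 4), (1, 11)), ((3, 6), (12, 2)), ((9, 5), (4, 13)),
   ((11, 8), (6, 0)), ((8, 2), (0, 14)), ((2, 9), (10, 12)), ((4, 10), (13, 7))]

-- while current != end: move one unit (x first), appending each new position
def manhattan_path (current e : Int × Int) : List (Int × Int) :=
  if current = e then []
  else
    let next : Int × Int :=
      if current.1 < e.1 then (current.1 + 1, current.2)
      else if current.1 > e.1 then (current.1 - 1, current.2)
      else if current.2 < e.2 then (current.1, current.2 + 1)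
      else (current.1, current.2 - 1)
    next :: manhattan_path next e
termination_by ((e.1 - current.1).natAbs + (e.2 - current.2).natAbs)
decreasing_by
  all_goals (split_ifs <;> simp_all [Prod.ext_iff] <;> omega)

def generate_route (chromosome : List Int) : List (Int × Int) :=
  (chromosome.foldl
    (fun (st : List (Int × Int) × (Int × Int)) gene =>
      match PySem.List.pyGet? pvTASKS gene with
      | some (pick, drop) =>
          ((st.1 ++ (manhattan_path st.2 pick).drop 1) ++ (manhattan_path pick drop).drop 1, drop)
      | none => st)  -- Python raises IndexError here; excluded by Pre_
    ([(0, 0)], (0, 0))).1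

-- ===== PORT B =====
def pvSegment (s e : Int × Int) : List (Int × Int) :=
  (if s.1 ≤ e.1 then PySem.List.pyRange (s.1 + 1) (e.1 + 1) 1
   else PySem.List.pyRange (s.1 - 1) (e.1 - 1) (-1)).map (fun x => (x, s.2))
  ++
  (if s.2 ≤ e.2 then PySem.List.pyRange (s.2 + 1) (e.2 + 1) 1
   else PySem.List.pyRange (s.2 - 1) (e.2 - 1) (-1)).map (fun y => (e.1, y))

def generate_route_alt (chromosome : List Int) : List (Int × Int) :=
  (chromosome.foldl
    (fun (st : List (Int × Int) × (Int × Int)) gene =>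
      match PySem.List.pyGet? pvTASKS gene with
      | some (pick, drop) =>
          ((st.1 ++ (pvSegment st.2 pick).drop 1) ++ (pvSegment pick drop).drop 1, drop)
      | none => st)  -- Python raises IndexError here; excluded by Pre_
    ([(0, 0)], (0, 0))).1

-- ===== PRECONDITION & SPEC =====
-- A raises IndexError when a gene is outside the valid (Python, possibly negative) index range of the 8 TASKS.
def Pre_generate_route (chromosome : List Int) : Prop :=
  ∀ g ∈ chromosome, -8 ≤ g ∧ g < 8
instance (chromosome : List Int) : Decidable (Pre_generate_route chromosome) := by
  unfold Pre_generate_route; infer_instance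
def pvWitness_generate_route : List Int := [0, -3, 7, 2]

def Spec_generate_route (chromosome : List Int) (out : List (Int × Int)) : Prop := out = generate_route_alt chromosome
instance (chromosome : List Int) (out : List (Int × Int)) : Decidable (Spec_generate_route chromosome out) := by unfold Spec_generate_route; infer_instance

-- ===== CLAIM (what is proved, stated in full; the proofs are below) =====
def Claim_equal_generate_route : Prop := ∀ (chromosome : List Int), Dom_generate_route chromosome → Pre_generate_route chromosome → Spec_generate_route chromosome (generate_route chromosome)

-- ===== LEMMAS AND PROOFS =====

-- The step-loop equals the closed-form two-sweep segment, for any endpoints.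
theorem manhattan_path_eq_segment (c e : Int × Int) : manhattan_path c e = pvSegment c e := by
  rw [manhattan_path]
  split
  · next h =>
    subst h
    simp [pvSegment, PySem.List.pyRange_one_eq_nil (by omega : e.1 + 1 ≤ e.1 + 1)]
  · next h =>
    split_ifs with h1 h2 h3
    · -- x increases
      show ((c.1 + 1, c.2) :: manhattan_path (c.1 + 1, c.2) e) = pvSegment c e
      rw [manhattan_path_eq_segment (c.1 + 1, c.2) e]
      simp only [pvSegment]
      rw [if_pos (by omega : c.1 ≤ e.1), if_pos (by omega : c.1 + 1 ≤ e.1),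
          PySem.List.pyRange_one_cons (by omega : c.1 + 1 < e.1 + 1)]
      simp
    · -- x decreases
      show ((c.1 - 1, c.2) :: manhattan_path (c.1 - 1, c.2) e) = pvSegment c e
      rw [manhattan_path_eq_segment (c.1 - 1, c.2) e]
      simp only [pvSegment]
      rw [if_neg (by omega : ¬ c.1 ≤ e.1),
          PySem.List.pyRange_neg_one_cons (by omega : e.1 - 1 < c.1 - 1)]
      by_cases hb : c.1 - 1 ≤ e.1
      · rw [if_pos hb,
            PySem.List.pyRange_one_eq_nil (by omega : e.1 + 1 ≤ c.1 - 1 + 1),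
            PySem.List.pyRange_neg_one_eq_nil (by omega : c.1 - 1 - 1 ≤ e.1 - 1)]
        simp
      · rw [if_neg hb]
        simp
    · -- x settled, y increases
      show ((c.1, c.2 + 1) :: manhattan_path (c.1, c.2 + 1) e) = pvSegment c e
      rw [manhattan_path_eq_segment (c.1, c.2 + 1) e]
      have hx : c.1 = e.1 := by omega
      simp only [pvSegment]
      rw [if_pos (by omega : c.1 ≤ e.1),
          PySem.List.pyRange_one_eq_nil (by omega : e.1 + 1 ≤ c.1 + 1),
          if_pos (by omega : c.2 ≤ e.2), if_pos (by omega : c.2 + 1 ≤ e.2),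
          PySem.List.pyRange_one_cons (by omega : c.2 + 1 < e.2 + 1)]
      simp [hx]
    · -- x settled, y decreases
      have hx : c.1 = e.1 := by omega
      have hy : e.2 < c.2 := by
        rcases lt_trichotomy c.2 e.2 with h' | h' | h'
        · exact absurd h' h3
        · exact absurd (Prod.ext hx h') h
        · exact h'
      show ((c.1, c.2 - 1) :: manhattan_path (c.1, c.2 - 1) e) = pvSegment c e
      rw [manhattan_path_eq_segment (c.1, c.2 - 1) e]
      simp only [pvSegment]
      rw [if_pos (by omega : c.1 ≤ e.1),
          PySem.List.pyRange_one_eq_nil (by omega : e.1 + 1 ≤ c.1 + 1),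
          if_neg (by omega : ¬ c.2 ≤ e.2),
          PySem.List.pyRange_neg_one_cons (by omega : e.2 - 1 < c.2 - 1)]
      by_cases hb : c.2 - 1 ≤ e.2
      · rw [if_pos hb,
            PySem.List.pyRange_one_eq_nil (by omega : e.2 + 1 ≤ c.2 - 1 + 1),
            PySem.List.pyRange_neg_one_eq_nil (by omega : c.2 - 1 - 1 ≤ e.2 - 1)]
        simp [hx]
      · rw [if_neg hb]
        simp [hx]
termination_by ((e.1 - c.1).natAbs + (e.2 - c.2).natAbs)
decreasing_by all_goals (simp_all [Prod.ext_iff]; omega)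

-- ===== VERDICT (by name: the statement is the Claim_ definition above) =====
theorem generate_route_spec : Claim_equal_generate_route := by
  intro chromosome _ _
  unfold Spec_generate_route generate_route generate_route_alt
  congr 2
  funext st gene
  simp only [manhattan_path_eq_segment]
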